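-- pv_equiv track=rewrite | github.com/pepperedSalmon/yugioh_retriver | yugioh_card_retriver/yugioh_objects.py | name_format
-- ===== SOURCE A (Python) =====
-- def name_format(card_name,LINE_WIDTH):
--     card_name = str(card_name)
--     b1 = ""
--     b2 = ""
--     b3 = ""
--     if len(card_name) < LINE_WIDTH:
--         for i in range(LINE_WIDTH - len(card_name)):
--                 b1+=" "
--         for i in range(LINE_WIDTH):
--             b2+=" "
--         f1 = card_name + b1
--         f2 = b2
--     elif len(card_name) < 2 * LINE_WIDTH:
--          for i in range(2 * LINE_WIDTH - len(card_name)):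
--                 b2+=" "
--          f1 = card_name[0:LINE_WIDTH]
--          f2 = card_name[LINE_WIDTH:len(card_name)] + b2
--     else:
--         f1 = card_name[0:LINE_WIDTH]
--         f2 = card_name[LINE_WIDTH:LINE_WIDTH * 2]
--     return [f1,f2]
-- ===== SOURCE B (Python) =====
-- def name_format(card_name, LINE_WIDTH):
--     s = str(card_name).ljust(2 * LINE_WIDTH)
--     return [s[0:LINE_WIDTH], s[LINE_WIDTH:2 * LINE_WIDTH]]
-- ===== Notes on version B (the rewrite author's own statement) =====
-- stated objective: simpler
-- what changed: Replaces the three-branch case analysis with space-building loops by a single ljust to the full two-line width followed by two slices.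
import Mathlib
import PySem

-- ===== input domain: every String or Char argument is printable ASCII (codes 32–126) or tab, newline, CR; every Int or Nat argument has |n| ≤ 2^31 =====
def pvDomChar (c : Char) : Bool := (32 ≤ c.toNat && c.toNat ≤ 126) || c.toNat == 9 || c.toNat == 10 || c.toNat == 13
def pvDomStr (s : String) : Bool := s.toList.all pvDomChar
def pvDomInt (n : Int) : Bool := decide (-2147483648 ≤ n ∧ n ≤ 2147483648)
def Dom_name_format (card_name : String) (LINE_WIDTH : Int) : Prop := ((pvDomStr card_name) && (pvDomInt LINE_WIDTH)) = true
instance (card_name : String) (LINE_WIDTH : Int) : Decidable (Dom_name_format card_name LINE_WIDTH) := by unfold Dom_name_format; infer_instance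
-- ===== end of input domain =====

-- B replaces A's three-branch case analysis with its space-appending loops by a single
-- pad-to-2*LINE_WIDTH followed by two slices (objective: simpler); return values agree on every input.

-- ===== PORT A =====
def name_format (card_name : String) (LINE_WIDTH : Int) : List String :=
  let cs := card_name.toList
  if (cs.length : Int) < LINE_WIDTH then
    let b1 := (PySem.List.pyRange 0 (LINE_WIDTH - (cs.length : Int)) 1).foldl
      (fun acc _ => acc ++ [' ']) ([] : List Char)
    let b2 := (PySem.List.pyRange 0 LINE_WIDTH 1).foldl
      (fun acc _ => acc ++ [' ']) ([] : List Char)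
    [String.ofList (cs ++ b1), String.ofList b2]
  else if (cs.length : Int) < 2 * LINE_WIDTH then
    let b2 := (PySem.List.pyRange 0 (2 * LINE_WIDTH - (cs.length : Int)) 1).foldl
      (fun acc _ => acc ++ [' ']) ([] : List Char)
    [String.ofList (PySem.List.slice cs (some 0) (some LINE_WIDTH)),
     String.ofList (PySem.List.slice cs (some LINE_WIDTH) (some (cs.length : Int)) ++ b2)]
  else
    [String.ofList (PySem.List.slice cs (some 0) (some LINE_WIDTH)),
     String.ofList (PySem.List.slice cs (some LINE_WIDTH) (some (LINE_WIDTH * 2)))]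

-- ===== PORT B =====
-- s.ljust(w) is s followed by (w - len s) spaces when w exceeds len s, else s itself:
-- exactly `++ List.replicate (w - len).toNat ' '`.
def name_format_alt (card_name : String) (LINE_WIDTH : Int) : List String :=
  let cs := card_name.toList
  let s := cs ++ List.replicate ((2 * LINE_WIDTH - (cs.length : Int)).toNat) ' '
  [String.ofList (PySem.List.slice s (some 0) (some LINE_WIDTH)),
   String.ofList (PySem.List.slice s (some LINE_WIDTH) (some (2 * LINE_WIDTH)))]

-- ===== PRECONDITION & SPEC =====
def Spec_name_format (card_name : String) (LINE_WIDTH : Int) (out : List String) : Prop := out = name_format_alt card_name LINE_WIDTH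
instance (card_name : String) (LINE_WIDTH : Int) (out : List String) : Decidable (Spec_name_format card_name LINE_WIDTH out) := by unfold Spec_name_format; infer_instance

-- ===== CLAIM (what is proved, stated in full; the proofs are below) =====
def Claim_equal_name_format : Prop := ∀ (card_name : String) (LINE_WIDTH : Int), Dom_name_format card_name LINE_WIDTH → Spec_name_format card_name LINE_WIDTH (name_format card_name LINE_WIDTH)

-- ===== LEMMAS AND PROOFS =====

-- A's space-appending loop over range(n) builds exactly n spaces.
theorem foldl_spaces (n : Int) (init : List Char) :
    (PySem.List.pyRange 0 n 1).foldl (fun acc _ => acc ++ [' ']) init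
      = init ++ List.replicate n.toNat ' ' := by
  rw [PySem.List.foldl_append_singleton_eq_map]
  simp [List.map_const', PySem.List.length_pyRange_one]

-- Taking a prefix that reaches into the padding of a padded string.
theorem take_pad (cs : List Char) (a b : Nat) (h : cs.length ≤ a) (h2 : a ≤ cs.length + b) :
    (cs ++ List.replicate b ' ').take a = cs ++ List.replicate (a - cs.length) ' ' := by
  rw [List.take_append, List.take_of_length_le h, List.take_replicate]
  congr 2
  omega

-- Dropping past the original string leaves only padding.
theorem drop_pad (cs : List Char) (a b : Nat) (h : cs.length ≤ a) :
    (cs ++ List.replicate b ' ').drop a = List.replicate (b - (a - cs.length)) ' ' := by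
  rw [List.drop_append, List.drop_of_length_le h, List.drop_replicate, List.nil_append]

-- ===== VERDICT (by name: the statement is the Claim_ definition above) =====
theorem name_format_spec : Claim_equal_name_format := by
  intro card_name W _
  unfold Spec_name_format name_format name_format_alt
  generalize card_name.toList = cs
  by_cases h1 : (cs.length : Int) < W
  · have hW : 0 ≤ W := le_of_lt (lt_of_le_of_lt (Int.natCast_nonneg _) h1)
    simp only [if_pos h1, foldl_spaces, List.nil_append,
      PySem.List.slice_zero_start, PySem.List.slice_to _ hW,
      PySem.List.slice_toNat _ hW (by omega : (0:Int) ≤ 2 * W)]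
    have hp1 : cs.length ≤ W.toNat := by omega
    have hp2 : W.toNat ≤ cs.length + (2 * W - (cs.length : Int)).toNat := by omega
    rw [take_pad cs W.toNat ((2 * W - (cs.length : Int)).toNat) hp1 hp2,
        drop_pad cs W.toNat ((2 * W - (cs.length : Int)).toNat) hp1, List.take_replicate]
    congr 3 <;> congr 1 <;> omega
  · by_cases h2 : (cs.length : Int) < 2 * W
    · have hW : 0 ≤ W := by omega
      simp only [if_neg h1, if_pos h2, foldl_spaces, List.nil_append,
        PySem.List.slice_zero_start, PySem.List.slice_to _ hW,
        PySem.List.slice_toNat _ hW (by omega : (0:Int) ≤ 2 * W),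
        PySem.List.slice_toNat _ hW (Int.natCast_nonneg _)]
      rw [List.take_append_of_le_length (by omega),
          List.drop_append_of_le_length (by omega)]
      rw [List.take_of_length_le (l := List.drop W.toNat cs ++ List.replicate ((2 * W - (cs.length : Int)).toNat) ' ')
            (by simp only [List.length_append, List.length_drop, List.length_replicate]; omega),
          List.take_of_length_le (l := List.drop W.toNat cs)
            (by simp only [List.length_drop]; omega)]
    · simp only [if_neg h1, if_neg h2]
      have h0 : (2 * W - (cs.length : Int)).toNat = 0 := by omega
      rw [h0, List.replicate_zero, List.append_nil, mul_comm]
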